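-- pv_equiv track=rewrite | github.com/desnicaVe1esa/Codewars | src/kyu_6/triple_trouble_1/python/triple_trouble_1.py | triple_double
-- ===== SOURCE A (Python) =====
-- def triple_double(num1, num2):
--     n1str = str(num1)
--     n2str = str(num2)
--     for i in range(10):
--         n = str(i)
--         if n1str.count(n  *  3) > 0 and n2str.count(n  *  2) > 0:
--             return 1
--     return 0
-- ===== SOURCE B (Python) =====
-- def _runs(s, k):
--     out = set()
--     prev = None
--     run = 0
--     for ch in s:
--         run = run + 1 if ch == prev else 1
--         prev = ch
--         if run >= k:
--             out.add(ch)
--     return out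
--
-- def triple_double(num1, num2):
--     triples = _runs(str(num1), 3)
--     doubles = _runs(str(num2), 2)
--     return 1 if triples & doubles else 0
-- ===== Notes on version B (the rewrite author's own statement) =====
-- stated objective: alternative
-- what changed: Replaces the ten per-digit substring searches ('ddd' in str(num1), 'dd' in str(num2)) by a single run-length scan of each number's string that collects the set of characters with a run >= 3 (resp. >= 2), returning 1 iff the two sets intersect.
import Mathlib
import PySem

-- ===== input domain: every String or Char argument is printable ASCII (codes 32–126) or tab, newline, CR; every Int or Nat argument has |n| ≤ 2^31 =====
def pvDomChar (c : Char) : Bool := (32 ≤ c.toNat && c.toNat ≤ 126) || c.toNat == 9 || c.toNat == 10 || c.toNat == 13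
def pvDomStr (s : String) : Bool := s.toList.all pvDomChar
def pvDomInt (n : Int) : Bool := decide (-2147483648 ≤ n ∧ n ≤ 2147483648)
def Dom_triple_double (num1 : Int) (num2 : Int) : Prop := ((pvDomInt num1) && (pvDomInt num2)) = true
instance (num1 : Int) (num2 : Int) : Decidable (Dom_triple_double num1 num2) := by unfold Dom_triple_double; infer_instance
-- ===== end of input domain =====

-- B replaces A's ten per-digit substring searches by one run-length scan of each
-- number's string, collecting the characters with a run ≥ 3 (resp. ≥ 2) into sets
-- and intersecting them (objective: alternative algorithm, single pass per string).

-- ===== PORT A =====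
-- the for-loop over range(10) with early `return 1`; `str(i) * 3` is char-list repetition (PySem.List.pyRepeat, exact for str*int)
def tdLoop (n1str n2str : List Char) : List Int → Int
  | [] => 0
  | i :: rest =>
    let n := PySem.Int.toChars i
    if 0 < PySem.Chars.count n1str (PySem.List.pyRepeat n 3)
        ∧ 0 < PySem.Chars.count n2str (PySem.List.pyRepeat n 2)
    then 1 else tdLoop n1str n2str rest

def triple_double (num1 : Int) (num2 : Int) : Int :=
  let n1str := PySem.Int.toChars num1
  let n2str := PySem.Int.toChars num2
  tdLoop n1str n2str (PySem.List.pyRange 0 10 1)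

-- ===== PORT B =====
-- Source B's `_runs(s, k)` loop: state (prev, run, out); `ch == prev` with prev initially None
def runsGo (k : Nat) : List Char → Option Char → Nat → PySem.Set Char → PySem.Set Char
  | [], _, _, out => out
  | ch :: rest, prev, run, out =>
    let run' := if some ch = prev then run + 1 else 1
    let out' := if k ≤ run' then PySem.Set.add out ch else out
    runsGo k rest (some ch) run' out'

def triple_double_alt (num1 : Int) (num2 : Int) : Int :=
  let triples := runsGo 3 (PySem.Int.toChars num1) none 0 PySem.Set.empty
  let doubles := runsGo 2 (PySem.Int.toChars num2) none 0 PySem.Set.empty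
  if PySem.Set.inter triples doubles = [] then 0 else 1

-- ===== PRECONDITION & SPEC =====
def Spec_triple_double (num1 : Int) (num2 : Int) (out : Int) : Prop := out = triple_double_alt num1 num2
instance (num1 : Int) (num2 : Int) (out : Int) : Decidable (Spec_triple_double num1 num2 out) := by unfold Spec_triple_double; infer_instance

-- ===== CLAIM (what is proved, stated in full; the proofs are below) =====
def Claim_equal_triple_double : Prop := ∀ (num1 : Int) (num2 : Int), Dom_triple_double num1 num2 → Spec_triple_double num1 num2 (triple_double num1 num2)

-- ===== LEMMAS AND PROOFS =====

-- ---- A-side: positivity of PySem.Chars.count is substring occurrence ----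
lemma go_ge (sub : List Char) (fuel : Nat) : ∀ (l : List Char) (acc : Nat),
    acc ≤ PySem.Chars.count.go sub fuel l acc := by
  induction fuel with
  | zero => intro l acc; simp [PySem.Chars.count.go]
  | succ f ih =>
    intro l acc
    cases l with
    | nil => simp [PySem.Chars.count.go]
    | cons ch t =>
      simp only [PySem.Chars.count.go]
      split
      · exact le_trans (Nat.le_succ acc) (ih _ _)
      · exact ih t acc

lemma go_pos_iff (sub : List Char) (hsub : sub ≠ []) (fuel : Nat) : ∀ (l : List Char) (acc : Nat),
    l.length ≤ fuel → (acc < PySem.Chars.count.go sub fuel l acc ↔ sub <:+: l) := by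
  induction fuel with
  | zero =>
    intro l acc hl
    have hnil : l = [] := by cases l with | nil => rfl | cons a t => simp at hl
    subst hnil
    simp [PySem.Chars.count.go, List.infix_nil, hsub]
  | succ f ih =>
    intro l acc hl
    cases l with
    | nil => simp [PySem.Chars.count.go, List.infix_nil, hsub]
    | cons ch t =>
      simp only [PySem.Chars.count.go]
      by_cases hp : sub.isPrefixOf (ch :: t) = true
      · rw [if_pos hp]
        constructor
        · intro _; exact (List.isPrefixOf_iff_prefix.mp hp).isInfix
        · intro _
          exact lt_of_lt_of_le (Nat.lt_succ_self acc) (go_ge sub f _ (acc + 1))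
      · rw [if_neg hp]
        have ht : t.length ≤ f := by simpa using Nat.le_of_succ_le_succ (by simpa using hl)
        rw [ih t acc ht, List.infix_cons_iff]
        have hnp : ¬ sub <+: ch :: t := fun h => hp (List.isPrefixOf_iff_prefix.mpr h)
        simp [hnp]

lemma count_pos_iff (s sub : List Char) (hsub : sub ≠ []) :
    0 < PySem.Chars.count s sub ↔ sub <:+: s := by
  unfold PySem.Chars.count
  rw [if_neg (by simpa [List.isEmpty_iff] using hsub)]
  exact go_pos_iff sub hsub s.length s 0 le_rfl

-- ---- replicate / prefix / infix bookkeeping ----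
lemma rep_prefix_cons {k : Nat} (hk : 1 ≤ k) (c a : Char) (t : List Char) :
    List.replicate k c <+: a :: t ↔ c = a ∧ List.replicate (k - 1) c <+: t := by
  obtain ⟨k', rfl⟩ : ∃ k', k = k' + 1 := ⟨k - 1, by omega⟩
  simp [List.replicate_succ, List.cons_prefix_cons]

lemma rep_prefix_mono {a b : Nat} (hab : a ≤ b) (c : Char) {l : List Char}
    (h : List.replicate b c <+: l) : List.replicate a c <+: l := by
  refine List.IsPrefix.trans ?_ h
  exact ⟨List.replicate (b - a) c, by rw [← List.replicate_add]; congr 1; omega⟩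

lemma rep_infix_cons {k : Nat} (hk : 1 ≤ k) (c a : Char) (t : List Char) :
    List.replicate k c <:+: a :: t ↔
      (c = a ∧ List.replicate (k - 1) c <+: t) ∨ List.replicate k c <:+: t := by
  rw [List.infix_cons_iff, rep_prefix_cons hk]

-- ---- B-side: characterisation of the run-length scan ----
lemma runsGo_inv {k : Nat} (hk : 2 ≤ k) :
    ∀ (s : List Char) (p : Char) (r : Nat) (out : PySem.Set Char) (c : Char),
      1 ≤ r → (k ≤ r → p ∈ out) →
      (c ∈ runsGo k s (some p) r out ↔
        c ∈ out ∨ List.replicate k c <:+: s ∨ (c = p ∧ List.replicate (k - r) p <+: s)) := by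
  intro s
  induction s with
  | nil =>
    intro p r out c hr hro
    simp only [runsGo, List.infix_nil]
    constructor
    · exact fun h => Or.inl h
    · rintro (h | h | ⟨rfl, h⟩)
      · exact h
      · exact absurd h (by cases k with | zero => omega | succ k' => simp)
      · have h0 : List.replicate (k - r) c = [] := List.prefix_nil.mp h
        have : k - r = 0 := by
          by_contra hne
          obtain ⟨m, hm⟩ : ∃ m, k - r = m + 1 := ⟨k - r - 1, by omega⟩
          rw [hm] at h0; simp [List.replicate_succ] at h0
        exact hro (by omega)
  | cons ch t ih =>
    intro p r out c hr hro
    by_cases hcp : ch = p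
    · subst hcp
      have step : runsGo k (ch :: t) (some ch) r out
          = runsGo k t (some ch) (r + 1) (if k ≤ r + 1 then PySem.Set.add out ch else out) := by
        simp [runsGo]
      have f2 : List.replicate (k - r) ch <+: ch :: t ↔ List.replicate (k - r - 1) ch <+: t := by
        by_cases hkr : k ≤ r
        · have h1 : k - r = 0 := by omega
          simp [h1]
        · rw [rep_prefix_cons (by omega)]; simp
      by_cases hk1 : k ≤ r + 1
      · rw [step, if_pos hk1,
          ih ch (r + 1) _ c (by omega) (fun _ => by rw [PySem.Set.mem_add]; exact Or.inr rfl)]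
        rw [PySem.Set.mem_add, rep_infix_cons (by omega), f2]
        constructor
        · rintro ((h | rfl) | h | ⟨rfl, _⟩)
          · exact Or.inl h
          · exact Or.inr (Or.inr ⟨rfl, by simp [show k - r - 1 = 0 by omega]⟩)
          · exact Or.inr (Or.inl (Or.inr h))
          · exact Or.inr (Or.inr ⟨rfl, by simp [show k - r - 1 = 0 by omega]⟩)
        · rintro (h | (⟨rfl, _⟩ | h) | ⟨rfl, _⟩)
          · exact Or.inl (Or.inl h)
          · exact Or.inl (Or.inr rfl)
          · exact Or.inr (Or.inl h)
          · exact Or.inl (Or.inr rfl)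
      · rw [step, if_neg hk1, ih ch (r + 1) _ c (by omega) (fun h => absurd h (by omega))]
        rw [rep_infix_cons (by omega), f2]
        have harith : k - (r + 1) = k - r - 1 := by omega
        rw [harith]
        constructor
        · rintro (h | h | ⟨rfl, h⟩)
          · exact Or.inl h
          · exact Or.inr (Or.inl (Or.inr h))
          · exact Or.inr (Or.inr ⟨rfl, h⟩)
        · rintro (h | (⟨rfl, h⟩ | h) | ⟨rfl, h⟩)
          · exact Or.inl h
          · exact Or.inr (Or.inr ⟨rfl, rep_prefix_mono (by omega) _ h⟩)
          · exact Or.inr (Or.inl h)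
          · exact Or.inr (Or.inr ⟨rfl, h⟩)
    · have step : runsGo k (ch :: t) (some p) r out = runsGo k t (some ch) 1 out := by
        simp [runsGo, hcp, show ¬ k ≤ 1 by omega]
      rw [step, ih ch 1 out c le_rfl (fun h => absurd h (by omega))]
      rw [rep_infix_cons (by omega)]
      have f6 : (c = p ∧ List.replicate (k - r) p <+: ch :: t) → c ∈ out := by
        rintro ⟨rfl, h⟩
        by_cases hkr : k ≤ r
        · exact hro hkr
        · exact absurd ((rep_prefix_cons (by omega) c ch t).mp h).1 fun he => hcp he.symm
      constructor
      · rintro (h | h | ⟨rfl, h⟩)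
        · exact Or.inl h
        · exact Or.inr (Or.inl (Or.inr h))
        · exact Or.inr (Or.inl (Or.inl ⟨rfl, h⟩))
      · rintro (h | (⟨rfl, h⟩ | h) | hcp')
        · exact Or.inl h
        · exact Or.inr (Or.inr ⟨rfl, h⟩)
        · exact Or.inr (Or.inl h)
        · exact Or.inl (f6 hcp')

lemma mem_runs {k : Nat} (hk : 2 ≤ k) (s : List Char) (c : Char) :
    c ∈ runsGo k s none 0 PySem.Set.empty ↔ List.replicate k c <:+: s := by
  cases s with
  | nil =>
    simp only [runsGo, List.infix_nil, PySem.Set.empty]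
    constructor
    · intro h; simp at h
    · intro h; exact absurd h (by cases k with | zero => omega | succ k' => simp)
  | cons ch t =>
    have step : runsGo k (ch :: t) none 0 PySem.Set.empty
        = runsGo k t (some ch) 1 PySem.Set.empty := by
      simp [runsGo, show ¬ k ≤ 1 by omega]
    rw [step, runsGo_inv hk t ch 1 _ c le_rfl (fun h => absurd h (by omega)),
      rep_infix_cons (by omega)]
    have hemp : c ∉ (PySem.Set.empty : PySem.Set Char) := by simp [PySem.Set.empty]
    constructor
    · rintro (h | h | ⟨rfl, h⟩)
      · exact absurd h hemp
      · exact Or.inr h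
      · exact Or.inl ⟨rfl, h⟩
    · rintro (⟨rfl, h⟩ | h)
      · exact Or.inr (Or.inr ⟨rfl, h⟩)
      · exact Or.inr (Or.inl h)

-- ---- A's loop returns 1 iff some digit satisfies the test ----
lemma tdLoop_eq (s1 s2 : List Char) (l : List Int) :
    tdLoop s1 s2 l =
      if ∃ i ∈ l, (0 < PySem.Chars.count s1 (PySem.List.pyRepeat (PySem.Int.toChars i) 3)
          ∧ 0 < PySem.Chars.count s2 (PySem.List.pyRepeat (PySem.Int.toChars i) 2))
      then 1 else 0 := by
  induction l with
  | nil => simp [tdLoop]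
  | cons i rest ih =>
    simp only [tdLoop, ih, List.exists_mem_cons_iff]
    by_cases hC : (0 < PySem.Chars.count s1 (PySem.List.pyRepeat (PySem.Int.toChars i) 3)
        ∧ 0 < PySem.Chars.count s2 (PySem.List.pyRepeat (PySem.Int.toChars i) 2))
    · simp [hC]
    · simp [hC]

-- ---- characters of str(n): a dash or a decimal digit; no double dash ----
lemma digitChar_ne_dash (m : Nat) : Nat.digitChar m ≠ '-' := by
  rcases Nat.lt_or_ge m 16 with h | h
  · interval_cases m <;> decide
  · have he : Nat.digitChar m = '*' := by
      unfold Nat.digitChar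
      repeat rw [if_neg (by omega)]
    rw [he]; decide

lemma digitChar_mem (m : Nat) (h : m < 10) :
    Nat.digitChar m ∈ ['0','1','2','3','4','5','6','7','8','9'] := by
  interval_cases m <;> decide

lemma toDigitsCore_mem (f : Nat) : ∀ (n : Nat) (l : List Char) (c : Char),
    c ∈ Nat.toDigitsCore 10 f n l → c ∈ l ∨ ∃ m, m < 10 ∧ c = Nat.digitChar m := by
  induction f with
  | zero => intro n l c h; exact Or.inl (by simpa [Nat.toDigitsCore] using h)
  | succ f ih =>
    intro n l c h
    rw [Nat.toDigitsCore] at h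
    by_cases h0 : n / 10 = 0
    · rw [if_pos h0] at h
      rcases List.mem_cons.mp h with hc | hc
      · exact Or.inr ⟨n % 10, Nat.mod_lt _ (by norm_num), hc⟩
      · exact Or.inl hc
    · rw [if_neg h0] at h
      rcases ih _ _ _ h with hc | hc
      · rcases List.mem_cons.mp hc with hc' | hc'
        · exact Or.inr ⟨n % 10, Nat.mod_lt _ (by norm_num), hc'⟩
        · exact Or.inl hc'
      · exact Or.inr hc

lemma dash_not_in_toDigits (m : Nat) : '-' ∉ Nat.toDigits 10 m := by
  intro h
  rcases toDigitsCore_mem _ _ _ _ (by simpa [Nat.toDigits] using h) with h' | ⟨m', _, he⟩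
  · simp at h'
  · exact digitChar_ne_dash m' he.symm

lemma mem_toChars (n : Int) (c : Char) (h : c ∈ PySem.Int.toChars n) :
    c = '-' ∨ c ∈ ['0','1','2','3','4','5','6','7','8','9'] := by
  unfold PySem.Int.toChars at h
  by_cases hn : n < 0
  · rw [if_pos hn] at h
    rcases List.mem_cons.mp h with hc | hc
    · exact Or.inl hc
    · rcases toDigitsCore_mem _ _ _ _ (by simpa [Nat.toDigits] using hc) with h' | ⟨m, hm, he⟩
      · simp at h'
      · exact Or.inr (he ▸ digitChar_mem m hm)
  · rw [if_neg hn] at h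
    rcases toDigitsCore_mem _ _ _ _ (by simpa [Nat.toDigits] using h) with h' | ⟨m, hm, he⟩
    · simp at h'
    · exact Or.inr (he ▸ digitChar_mem m hm)

lemma no_ddash (n : Int) : ¬ (['-', '-'] <:+: PySem.Int.toChars n) := by
  intro h
  unfold PySem.Int.toChars at h
  by_cases hn : n < 0
  · rw [if_pos hn] at h
    rcases List.infix_cons_iff.mp h with hp | hi
    · have : ['-'] <+: Nat.toDigits 10 n.natAbs := (List.cons_prefix_cons.mp hp).2
      exact dash_not_in_toDigits _ (this.subset (by simp))
    · exact dash_not_in_toDigits _ (hi.subset (by simp))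
  · rw [if_neg hn] at h
    exact dash_not_in_toDigits _ (h.subset (by simp))

-- ---- the ten digit cases ----
lemma case_fwd {s1 s2 : List Char} {i : Int} (c : Char)
    (h3 : PySem.List.pyRepeat (PySem.Int.toChars i) 3 = List.replicate 3 c)
    (h2 : PySem.List.pyRepeat (PySem.Int.toChars i) 2 = List.replicate 2 c)
    (p1 : 0 < PySem.Chars.count s1 (PySem.List.pyRepeat (PySem.Int.toChars i) 3))
    (p2 : 0 < PySem.Chars.count s2 (PySem.List.pyRepeat (PySem.Int.toChars i) 2)) :
    ∃ c', List.replicate 3 c' <:+: s1 ∧ List.replicate 2 c' <:+: s2 :=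
  ⟨c, (count_pos_iff s1 _ (by simp)).mp (h3 ▸ p1),
      (count_pos_iff s2 _ (by simp)).mp (h2 ▸ p2)⟩

lemma case_bwd {s1 s2 : List Char} (i : Int) (c : Char)
    (hmem : i ∈ ([0,1,2,3,4,5,6,7,8,9] : List Int))
    (h3 : PySem.List.pyRepeat (PySem.Int.toChars i) 3 = List.replicate 3 c)
    (h2 : PySem.List.pyRepeat (PySem.Int.toChars i) 2 = List.replicate 2 c)
    (p1 : List.replicate 3 c <:+: s1) (p2 : List.replicate 2 c <:+: s2) :
    ∃ j ∈ ([0,1,2,3,4,5,6,7,8,9] : List Int),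
      (0 < PySem.Chars.count s1 (PySem.List.pyRepeat (PySem.Int.toChars j) 3)
        ∧ 0 < PySem.Chars.count s2 (PySem.List.pyRepeat (PySem.Int.toChars j) 2)) :=
  ⟨i, hmem, by rw [h3]; exact (count_pos_iff s1 _ (by simp)).mpr p1,
      by rw [h2]; exact (count_pos_iff s2 _ (by simp)).mpr p2⟩

-- ===== VERDICT (by name: the statement is the Claim_ definition above) =====
theorem triple_double_spec : Claim_equal_triple_double := by
  intro num1 num2 _
  unfold Spec_triple_double
  simp only [triple_double, triple_double_alt]
  rw [tdLoop_eq, show PySem.List.pyRange 0 10 1 = [0,1,2,3,4,5,6,7,8,9] from by decide]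
  by_cases hc : ∃ c, List.replicate 3 c <:+: PySem.Int.toChars num1
      ∧ List.replicate 2 c <:+: PySem.Int.toChars num2
  · obtain ⟨c, p1, p2⟩ := hc
    rw [if_pos ?hA, if_neg ?hB]
    case hA =>
      have hcm : c ∈ PySem.Int.toChars num2 := p2.subset (by simp)
      rcases mem_toChars num2 c hcm with rfl | hdig
      · exact absurd (by simpa using p2) (no_ddash num2)
      · fin_cases hdig
        · exact case_bwd 0 '0' (by decide) (by decide) (by decide) p1 p2
        · exact case_bwd 1 '1' (by decide) (by decide) (by decide) p1 p2
        · exact case_bwd 2 '2' (by decide) (by decide) (by decide) p1 p2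
        · exact case_bwd 3 '3' (by decide) (by decide) (by decide) p1 p2
        · exact case_bwd 4 '4' (by decide) (by decide) (by decide) p1 p2
        · exact case_bwd 5 '5' (by decide) (by decide) (by decide) p1 p2
        · exact case_bwd 6 '6' (by decide) (by decide) (by decide) p1 p2
        · exact case_bwd 7 '7' (by decide) (by decide) (by decide) p1 p2
        · exact case_bwd 8 '8' (by decide) (by decide) (by decide) p1 p2
        · exact case_bwd 9 '9' (by decide) (by decide) (by decide) p1 p2
    case hB =>
      intro hnil
      have : c ∈ PySem.Set.inter (runsGo 3 (PySem.Int.toChars num1) none 0 PySem.Set.empty)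
          (runsGo 2 (PySem.Int.toChars num2) none 0 PySem.Set.empty) :=
        (PySem.Set.mem_inter _ _ c).mpr
          ⟨(mem_runs (by omega) _ c).mpr p1, (mem_runs (by omega) _ c).mpr p2⟩
      rw [hnil] at this
      simp at this
  · rw [if_neg ?hA, if_pos ?hB]
    case hA =>
      rintro ⟨i, hi, p1, p2⟩
      fin_cases hi
      · exact hc (case_fwd '0' (by decide) (by decide) p1 p2)
      · exact hc (case_fwd '1' (by decide) (by decide) p1 p2)
      · exact hc (case_fwd '2' (by decide) (by decide) p1 p2)
      · exact hc (case_fwd '3' (by decide) (by decide) p1 p2)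
      · exact hc (case_fwd '4' (by decide) (by decide) p1 p2)
      · exact hc (case_fwd '5' (by decide) (by decide) p1 p2)
      · exact hc (case_fwd '6' (by decide) (by decide) p1 p2)
      · exact hc (case_fwd '7' (by decide) (by decide) p1 p2)
      · exact hc (case_fwd '8' (by decide) (by decide) p1 p2)
      · exact hc (case_fwd '9' (by decide) (by decide) p1 p2)
    case hB =>
      rw [List.eq_nil_iff_forall_not_mem]
      intro c hmemc
      obtain ⟨h1, h2⟩ := (PySem.Set.mem_inter _ _ c).mp hmemc
      exact hc ⟨c, (mem_runs (by omega) _ c).mp h1, (mem_runs (by omega) _ c).mp h2⟩
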